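-- pv_equiv track=rewrite | github.com/hogiljung/Algorithms | 프로그래머스/lv1/86491. 최소직사각형/최소직사각형.py | solution
-- ===== SOURCE A (Python) =====
-- def solution(sizes):
--     min_width = 0
--     min_height = 0
--
--     for size in sizes:
--         width1, width2 = max(min_width, size[0]), max(min_width, size[1])
--         height1, height2 = max(min_height, size[1]), max(min_height, size[0])
--
--         min_width, min_height = (width1, height1) if width1*height1 < width2*height2 else (width2, height2)
--
--     return min_width * min_height
-- ===== SOURCE B (Python) =====
-- def solution(sizes):
--     longs = [max(size[0], size[1]) for size in sizes]
--     shorts = [min(size[0], size[1]) for size in sizes]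
--     return max([0] + longs) * max([0] + shorts)
-- ===== Notes on version B (the rewrite author's own statement) =====
-- stated objective: simpler
-- what changed: B replaces A's coupled greedy (width,height) state with its two-orientation product comparison by two staged passes: map each card to its long and short side, then take the maximum of each list and multiply.
-- outside the precondition, e.g. on solution([[5]]): A raises IndexError, B raises IndexError
import Mathlib
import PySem

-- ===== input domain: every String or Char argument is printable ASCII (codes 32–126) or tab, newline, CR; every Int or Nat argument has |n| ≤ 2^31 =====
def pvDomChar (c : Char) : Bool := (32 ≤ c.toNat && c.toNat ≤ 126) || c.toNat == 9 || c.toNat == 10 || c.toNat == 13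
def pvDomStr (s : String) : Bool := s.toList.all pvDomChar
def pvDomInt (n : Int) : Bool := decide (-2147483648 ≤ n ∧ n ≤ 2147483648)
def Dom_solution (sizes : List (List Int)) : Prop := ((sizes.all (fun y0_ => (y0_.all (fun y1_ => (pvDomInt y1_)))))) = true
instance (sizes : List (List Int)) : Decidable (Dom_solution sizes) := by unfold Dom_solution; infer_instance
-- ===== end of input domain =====

-- B replaces A's coupled greedy (width,height) two-orientation comparison by two staged passes
-- (map to long sides, map to short sides, max each, multiply); same O(n), simpler.


-- ===== PORT A =====
-- step of A's loop: try both orientations against the running (min_width, min_height), keep the smaller area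
def solStepA (st : Int × Int) (size : List Int) : Int × Int :=
  let w1 := max st.1 (PySem.List.pyGetD size 0 0)
  let w2 := max st.1 (PySem.List.pyGetD size 1 0)
  let h1 := max st.2 (PySem.List.pyGetD size 1 0)
  let h2 := max st.2 (PySem.List.pyGetD size 0 0)
  if w1 * h1 < w2 * h2 then (w1, h1) else (w2, h2)

def solution (sizes : List (List Int)) : Int :=
  let st := sizes.foldl solStepA (0, 0)
  st.1 * st.2

-- ===== PORT B =====
-- longs = [max(size[0], size[1]) for size in sizes]; shorts likewise with min;
-- Python's max([0] + xs) is exactly the left fold of max over xs starting at 0.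
def solution_alt (sizes : List (List Int)) : Int :=
  let longs := sizes.map (fun size => max (PySem.List.pyGetD size 0 0) (PySem.List.pyGetD size 1 0))
  let shorts := sizes.map (fun size => min (PySem.List.pyGetD size 0 0) (PySem.List.pyGetD size 1 0))
  longs.foldl max 0 * shorts.foldl max 0

-- ===== PRECONDITION & SPEC =====
-- Pre_ excludes exactly the inputs where Python A raises IndexError: an inner list with fewer than two elements.
def Pre_solution (sizes : List (List Int)) : Prop := ∀ s ∈ sizes, 2 ≤ s.length
instance (sizes : List (List Int)) : Decidable (Pre_solution sizes) := by unfold Pre_solution; infer_instance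
def pvWitness_solution : List (List Int) := [[60, 50], [30, 70], [60, 30], [80, 40]]

def Spec_solution (sizes : List (List Int)) (out : Int) : Prop := out = solution_alt sizes
instance (sizes : List (List Int)) (out : Int) : Decidable (Spec_solution sizes out) := by unfold Spec_solution; infer_instance

-- ===== CLAIM (what is proved, stated in full; the proofs are below) =====
def Claim_equal_solution : Prop := ∀ (sizes : List (List Int)), Dom_solution sizes → Pre_solution sizes → Spec_solution sizes (solution sizes)

-- ===== LEMMAS AND PROOFS =====

-- One step of A, viewed as the (max, min) of its state, updates the running long/short maxima.
theorem solStep_key (W H a b : Int) (hW : 0 ≤ W) (hH : 0 ≤ H) :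
    (max (if max W a * max H b < max W b * max H a then (max W a, max H b) else (max W b, max H a)).1
         (if max W a * max H b < max W b * max H a then (max W a, max H b) else (max W b, max H a)).2,
     min (if max W a * max H b < max W b * max H a then (max W a, max H b) else (max W b, max H a)).1
         (if max W a * max H b < max W b * max H a then (max W a, max H b) else (max W b, max H a)).2)
    = (max (max (max W H) a) b, max (min W H) (min a b)) := by
  split <;> rename_i h <;>
    simp only [Prod.mk.injEq, max_def, min_def] at h ⊢ <;>
    split_ifs at h ⊢ <;>
    refine ⟨?_, ?_⟩ <;>
    first | omega | nlinarith [mul_nonneg hW hH]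

-- Invariant: the (max, min) of A's fold state equals the two independent max-folds of B.
theorem solFold_inv (l : List (List Int)) : ∀ (W H : Int), 0 ≤ W → 0 ≤ H →
    (max (l.foldl solStepA (W, H)).1 (l.foldl solStepA (W, H)).2,
     min (l.foldl solStepA (W, H)).1 (l.foldl solStepA (W, H)).2)
    = ((l.map (fun s => max (PySem.List.pyGetD s 0 0) (PySem.List.pyGetD s 1 0))).foldl max (max W H),
       (l.map (fun s => min (PySem.List.pyGetD s 0 0) (PySem.List.pyGetD s 1 0))).foldl max (min W H)) := by
  induction l with
  | nil => intro W H _ _; simp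
  | cons s t ih =>
    intro W H hW hH
    have hk := solStep_key W H (PySem.List.pyGetD s 0 0) (PySem.List.pyGetD s 1 0) hW hH
    simp only [List.foldl_cons, List.map_cons]
    have hA : solStepA (W, H) s =
        (if max W (PySem.List.pyGetD s 0 0) * max H (PySem.List.pyGetD s 1 0) <
            max W (PySem.List.pyGetD s 1 0) * max H (PySem.List.pyGetD s 0 0)
         then (max W (PySem.List.pyGetD s 0 0), max H (PySem.List.pyGetD s 1 0))
         else (max W (PySem.List.pyGetD s 1 0), max H (PySem.List.pyGetD s 0 0))) := by
      simp [solStepA]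
    rw [hA]
    set st := (if max W (PySem.List.pyGetD s 0 0) * max H (PySem.List.pyGetD s 1 0) <
            max W (PySem.List.pyGetD s 1 0) * max H (PySem.List.pyGetD s 0 0)
         then (max W (PySem.List.pyGetD s 0 0), max H (PySem.List.pyGetD s 1 0))
         else (max W (PySem.List.pyGetD s 1 0), max H (PySem.List.pyGetD s 0 0))) with hst
    have h1 : 0 ≤ st.1 := by
      rw [hst]; split <;> simp <;> left <;> assumption
    have h2 : 0 ≤ st.2 := by
      rw [hst]; split <;> simp <;> left <;> assumption
    have hm1 : max st.1 st.2 = max (max (max W H) (PySem.List.pyGetD s 0 0)) (PySem.List.pyGetD s 1 0) := by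
      have := congrArg Prod.fst hk; simpa using this
    have hm2 : min st.1 st.2 = max (min W H) (min (PySem.List.pyGetD s 0 0) (PySem.List.pyGetD s 1 0)) := by
      have := congrArg Prod.snd hk; simpa using this
    rw [ih st.1 st.2 h1 h2, hm1, hm2, max_assoc]

-- ===== VERDICT (by name: the statement is the Claim_ definition above) =====
theorem solution_spec : Claim_equal_solution := by
  intro sizes _ _
  unfold Spec_solution solution solution_alt
  have h := solFold_inv sizes 0 0 le_rfl le_rfl
  simp only [max_self, min_self] at h
  have h1 := congrArg Prod.fst h
  have h2 := congrArg Prod.snd h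
  simp only at h1 h2
  calc (sizes.foldl solStepA (0, 0)).1 * (sizes.foldl solStepA (0, 0)).2
      = max (sizes.foldl solStepA (0, 0)).1 (sizes.foldl solStepA (0, 0)).2 *
        min (sizes.foldl solStepA (0, 0)).1 (sizes.foldl solStepA (0, 0)).2 := by
        rcases le_total (sizes.foldl solStepA (0, 0)).1 (sizes.foldl solStepA (0, 0)).2 with hle | hle <;>
          simp [max_eq_left, max_eq_right, min_eq_left, min_eq_right, hle, mul_comm]
    _ = _ := by rw [h1, h2]
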